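-- pv_equiv track=rewrite | github.com/chenguang217/veinsOffloading | examples/veins/rsuDecisionIndenpendent.py | relay
-- ===== SOURCE A (Python) =====
-- def relay(position, target):
--     relayStart = position
--     xlength = relayStart[0] - target[0]
--     ylength = relayStart[1] - target[1]
--     finalRelay = [relayStart]
--     for i in range(abs(int(xlength / 1000))):
--         if xlength > 0:
--             finalRelay.append([finalRelay[-1][0] - 1000, finalRelay[-1][1]])
--         else:
--             finalRelay.append([finalRelay[-1][0] + 1000, finalRelay[-1][1]])
--     for i in range(abs(int(ylength / 1000))):
--         if ylength > 0:
--             finalRelay.append([finalRelay[-1][0], finalRelay[-1][1] - 1000])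
--         else:
--             finalRelay.append([finalRelay[-1][0], finalRelay[-1][1] + 1000])
--     return finalRelay
-- ===== SOURCE B (Python) =====
-- def relay(position, target):
--     xlength = position[0] - target[0]
--     ylength = position[1] - target[1]
--     xstep = -1000 if xlength > 0 else 1000
--     ystep = -1000 if ylength > 0 else 1000
--     nx = abs(int(xlength / 1000))
--     ny = abs(int(ylength / 1000))
--     return ([position]
--             + [[position[0] + xstep * i, position[1]] for i in range(1, nx + 1)]
--             + [[position[0] + xstep * nx, position[1] + ystep * j] for j in range(1, ny + 1)])
-- ===== Notes on version B (the rewrite author's own statement) =====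
-- stated objective: simpler
-- what changed: replaces A's two accumulating loops that re-read the last appended waypoint with direct closed-form generation of each waypoint from its index (two comprehensions appended to [position])
import Mathlib
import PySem

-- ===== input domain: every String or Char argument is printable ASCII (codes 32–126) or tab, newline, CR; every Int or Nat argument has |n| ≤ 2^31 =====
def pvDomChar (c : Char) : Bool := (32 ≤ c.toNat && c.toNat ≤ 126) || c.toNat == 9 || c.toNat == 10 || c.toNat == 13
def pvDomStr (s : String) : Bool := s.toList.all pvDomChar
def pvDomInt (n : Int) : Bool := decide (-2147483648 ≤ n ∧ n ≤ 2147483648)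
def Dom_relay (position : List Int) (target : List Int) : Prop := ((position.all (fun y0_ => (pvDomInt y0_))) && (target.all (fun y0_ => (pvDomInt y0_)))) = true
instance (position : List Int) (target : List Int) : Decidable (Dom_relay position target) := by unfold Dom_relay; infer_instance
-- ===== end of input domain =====

-- B replaces A's two accumulating loops (each new waypoint read back off the end of the list)
-- by direct closed-form generation of each waypoint from its index; same cost, simpler shape.

-- ===== PORT A =====
-- int(xlength / 1000) is float true division then int() truncation toward zero; on Dom
-- (|coordinates| ≤ 2^31, so |difference| ≤ 2^32) the double rounding error is far below
-- 1/1000, so it is exactly truncating integer division Int.tdiv.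
def relay (position : List Int) (target : List Int) : List (List Int) :=
  let relayStart := position
  let xlength := PySem.List.pyGetD relayStart 0 0 - PySem.List.pyGetD target 0 0
  let ylength := PySem.List.pyGetD relayStart 1 0 - PySem.List.pyGetD target 1 0
  let finalRelay := [relayStart]
  let finalRelay := (List.range (Int.tdiv xlength 1000).natAbs).foldl (fun acc _ =>
    if xlength > 0 then
      acc ++ [[PySem.List.pyGetD (PySem.List.pyGetD acc (-1) []) 0 0 - 1000,
               PySem.List.pyGetD (PySem.List.pyGetD acc (-1) []) 1 0]]
    else
      acc ++ [[PySem.List.pyGetD (PySem.List.pyGetD acc (-1) []) 0 0 + 1000,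
               PySem.List.pyGetD (PySem.List.pyGetD acc (-1) []) 1 0]]) finalRelay
  let finalRelay := (List.range (Int.tdiv ylength 1000).natAbs).foldl (fun acc _ =>
    if ylength > 0 then
      acc ++ [[PySem.List.pyGetD (PySem.List.pyGetD acc (-1) []) 0 0,
               PySem.List.pyGetD (PySem.List.pyGetD acc (-1) []) 1 0 - 1000]]
    else
      acc ++ [[PySem.List.pyGetD (PySem.List.pyGetD acc (-1) []) 0 0,
               PySem.List.pyGetD (PySem.List.pyGetD acc (-1) []) 1 0 + 1000]]) finalRelay
  finalRelay

-- ===== PORT B =====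
def relay_alt (position : List Int) (target : List Int) : List (List Int) :=
  let xlength := PySem.List.pyGetD position 0 0 - PySem.List.pyGetD target 0 0
  let ylength := PySem.List.pyGetD position 1 0 - PySem.List.pyGetD target 1 0
  let xstep : Int := if xlength > 0 then -1000 else 1000
  let ystep : Int := if ylength > 0 then -1000 else 1000
  let nx : Int := ((Int.tdiv xlength 1000).natAbs : Int)
  let ny : Int := ((Int.tdiv ylength 1000).natAbs : Int)
  [position]
    ++ (PySem.List.pyRange 1 (nx + 1) 1).map
        (fun i => [PySem.List.pyGetD position 0 0 + xstep * i, PySem.List.pyGetD position 1 0])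
    ++ (PySem.List.pyRange 1 (ny + 1) 1).map
        (fun j => [PySem.List.pyGetD position 0 0 + xstep * nx,
                   PySem.List.pyGetD position 1 0 + ystep * j])

-- ===== PRECONDITION & SPEC =====
-- Pre_: the Python raises IndexError unless both lists have at least two elements.
def Pre_relay (position : List Int) (target : List Int) : Prop :=
  2 ≤ position.length ∧ 2 ≤ target.length
instance (position : List Int) (target : List Int) : Decidable (Pre_relay position target) := by unfold Pre_relay; infer_instance
def pvWitness_relay : List Int × List Int := ([1500, -300], [0, 0])

def Spec_relay (position : List Int) (target : List Int) (out : List (List Int)) : Prop := out = relay_alt position target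
instance (position : List Int) (target : List Int) (out : List (List Int)) : Decidable (Spec_relay position target out) := by unfold Spec_relay; infer_instance

-- ===== CLAIM (what is proved, stated in full; the proofs are below) =====
def Claim_equal_relay : Prop := ∀ (position : List Int) (target : List Int), Dom_relay position target → Pre_relay position target → Spec_relay position target (relay position target)

-- ===== LEMMAS AND PROOFS =====

-- last element of L ++ (range n).map g
lemma pyGetD_last_append_map (L : List (List Int)) (_hL : L ≠ []) (n : Nat) (g : Nat → List Int) :
    PySem.List.pyGetD (L ++ (List.range n).map g) (-1) ([] : List Int) =
      if _h : n = 0 then PySem.List.pyGetD L (-1) [] else g (n - 1) := by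
  cases n with
  | zero => simp
  | succ m =>
      rw [List.range_succ, List.map_append]
      simp only [List.map_cons, List.map_nil, ← List.append_assoc]
      rw [PySem.List.pyGetD_neg_one_append_singleton]
      simp

lemma getD0_pair (u v : Int) : PySem.List.pyGetD ([u, v] : List Int) 0 0 = u := by
  rw [show (0 : Int) = ((0 : Nat) : Int) from rfl, PySem.List.pyGetD_natCast]; rfl

lemma getD1_pair (u v : Int) : PySem.List.pyGetD ([u, v] : List Int) 1 0 = v := by
  rw [show (1 : Int) = ((1 : Nat) : Int) from rfl, PySem.List.pyGetD_natCast]; rfl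

-- one accumulating loop that appends [last0 + dx, last1 + dy] each step, in closed form
lemma loop_affine (dx dy a b : Int) (L : List (List Int)) (hL : L ≠ [])
    (h0 : PySem.List.pyGetD (PySem.List.pyGetD L (-1) ([] : List Int)) 0 0 = a)
    (h1 : PySem.List.pyGetD (PySem.List.pyGetD L (-1) ([] : List Int)) 1 0 = b)
    (n : Nat) :
    (List.range n).foldl
      (fun acc _ => acc ++
        [[PySem.List.pyGetD (PySem.List.pyGetD acc (-1) []) 0 0 + dx,
          PySem.List.pyGetD (PySem.List.pyGetD acc (-1) []) 1 0 + dy]]) L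
    = L ++ (List.range n).map (fun (i : Nat) => [a + dx * ((i : Int) + 1), b + dy * ((i : Int) + 1)]) := by
  induction n with
  | zero => simp
  | succ m ih =>
      rw [List.range_succ, List.foldl_append, ih, List.foldl_cons, List.foldl_nil]
      rw [pyGetD_last_append_map L hL m _]
      by_cases hm : m = 0
      · subst hm
        simp [h0, h1]
      · rw [dif_neg hm]
        rw [getD0_pair, getD1_pair]
        have hmc : ((m - 1 : Nat) : Int) + 1 = (m : Int) := by omega
        simp only [List.map_append, List.map_cons, List.map_nil, ← List.append_assoc]
        congr 3 <;> rw [hmc] <;> ring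

-- B's comprehension over range(1, n+1) as a map over List.range n
lemma pyRange_map {α : Type} (n : Nat) (f : Int → α) :
    (PySem.List.pyRange 1 ((n : Int) + 1) 1).map f
      = (List.range n).map (fun (k : Nat) => f ((k : Int) + 1)) := by
  rw [PySem.List.pyRange_one]
  have hn : ((n : Int) + 1 - 1).toNat = n := by omega
  rw [hn, List.map_map]
  exact List.map_congr_left (fun k _ => by simp [add_comm])

-- the whole of A's two rewritten loops, in B's closed form
lemma core (p : List Int) (sx sy : Int) (n m : Nat) :
    (List.range m).foldl
      (fun acc _ => acc ++
        [[PySem.List.pyGetD (PySem.List.pyGetD acc (-1) []) 0 0 + 0,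
          PySem.List.pyGetD (PySem.List.pyGetD acc (-1) []) 1 0 + sy]])
      ((List.range n).foldl
        (fun acc _ => acc ++
          [[PySem.List.pyGetD (PySem.List.pyGetD acc (-1) []) 0 0 + sx,
            PySem.List.pyGetD (PySem.List.pyGetD acc (-1) []) 1 0 + 0]]) [p])
    = [p]
      ++ (PySem.List.pyRange 1 ((n : Int) + 1) 1).map
          (fun i => [PySem.List.pyGetD p 0 0 + sx * i, PySem.List.pyGetD p 1 0])
      ++ (PySem.List.pyRange 1 ((m : Int) + 1) 1).map
          (fun j => [PySem.List.pyGetD p 0 0 + sx * (n : Int),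
                     PySem.List.pyGetD p 1 0 + sy * j]) := by
  have hp : PySem.List.pyGetD ([p] : List (List Int)) (-1) ([] : List Int) = p := by
    have := PySem.List.pyGetD_neg_one_append_singleton (xs := ([] : List (List Int))) (x := p) (d := ([] : List Int))
    simpa using this
  rw [loop_affine sx 0 (PySem.List.pyGetD p 0 0) (PySem.List.pyGetD p 1 0) [p] (by simp)
        (by rw [hp]) (by rw [hp]) n]
  have hA0 : PySem.List.pyGetD (PySem.List.pyGetD
      ([p] ++ (List.range n).map (fun (i : Nat) =>
        [PySem.List.pyGetD p 0 0 + sx * ((i : Int) + 1), PySem.List.pyGetD p 1 0 + 0 * ((i : Int) + 1)]))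
      (-1) ([] : List Int)) 0 0 = PySem.List.pyGetD p 0 0 + sx * (n : Int) := by
    rw [pyGetD_last_append_map [p] (by simp) n _]
    by_cases hn : n = 0
    · subst hn; simp [hp]
    · rw [dif_neg hn, getD0_pair]
      have : ((n - 1 : Nat) : Int) + 1 = (n : Int) := by omega
      rw [this]
  have hA1 : PySem.List.pyGetD (PySem.List.pyGetD
      ([p] ++ (List.range n).map (fun (i : Nat) =>
        [PySem.List.pyGetD p 0 0 + sx * ((i : Int) + 1), PySem.List.pyGetD p 1 0 + 0 * ((i : Int) + 1)]))
      (-1) ([] : List Int)) 1 0 = PySem.List.pyGetD p 1 0 := by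
    rw [pyGetD_last_append_map [p] (by simp) n _]
    by_cases hn : n = 0
    · subst hn; simp [hp]
    · rw [dif_neg hn, getD1_pair]; ring
  rw [loop_affine 0 sy (PySem.List.pyGetD p 0 0 + sx * (n : Int)) (PySem.List.pyGetD p 1 0)
        _ (by simp) hA0 hA1 m]
  rw [pyRange_map, pyRange_map]
  have e1 : (List.range n).map
      (fun (k : Nat) => [PySem.List.pyGetD p 0 0 + sx * ((k : Int) + 1), PySem.List.pyGetD p 1 0])
      = (List.range n).map (fun (i : Nat) =>
        [PySem.List.pyGetD p 0 0 + sx * ((i : Int) + 1), PySem.List.pyGetD p 1 0 + 0 * ((i : Int) + 1)]) :=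
    List.map_congr_left (fun k _ => by norm_num)
  have e2 : (List.range m).map
      (fun (k : Nat) => [PySem.List.pyGetD p 0 0 + sx * (n : Int), PySem.List.pyGetD p 1 0 + sy * ((k : Int) + 1)])
      = (List.range m).map (fun (i : Nat) =>
        [PySem.List.pyGetD p 0 0 + sx * (n : Int) + 0 * ((i : Int) + 1), PySem.List.pyGetD p 1 0 + sy * ((i : Int) + 1)]) :=
    List.map_congr_left (fun k _ => by norm_num)
  rw [e1, e2]

-- A's loop bodies, rewritten into the canonical '+ step' shape used by loop_affine/core
lemma body_x_pos : (fun (acc : List (List Int)) (_ : Nat) => acc ++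
      [[PySem.List.pyGetD (PySem.List.pyGetD acc (-1) []) 0 0 - 1000,
        PySem.List.pyGetD (PySem.List.pyGetD acc (-1) []) 1 0]])
    = (fun acc _ => acc ++
      [[PySem.List.pyGetD (PySem.List.pyGetD acc (-1) []) 0 0 + (-1000),
        PySem.List.pyGetD (PySem.List.pyGetD acc (-1) []) 1 0 + 0]]) := by
  funext acc i; simp [Int.sub_eq_add_neg]

lemma body_x_neg : (fun (acc : List (List Int)) (_ : Nat) => acc ++
      [[PySem.List.pyGetD (PySem.List.pyGetD acc (-1) []) 0 0 + 1000,
        PySem.List.pyGetD (PySem.List.pyGetD acc (-1) []) 1 0]])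
    = (fun acc _ => acc ++
      [[PySem.List.pyGetD (PySem.List.pyGetD acc (-1) []) 0 0 + 1000,
        PySem.List.pyGetD (PySem.List.pyGetD acc (-1) []) 1 0 + 0]]) := by
  funext acc i; simp

lemma body_y_pos : (fun (acc : List (List Int)) (_ : Nat) => acc ++
      [[PySem.List.pyGetD (PySem.List.pyGetD acc (-1) []) 0 0,
        PySem.List.pyGetD (PySem.List.pyGetD acc (-1) []) 1 0 - 1000]])
    = (fun acc _ => acc ++
      [[PySem.List.pyGetD (PySem.List.pyGetD acc (-1) []) 0 0 + 0,
        PySem.List.pyGetD (PySem.List.pyGetD acc (-1) []) 1 0 + (-1000)]]) := by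
  funext acc i; simp [Int.sub_eq_add_neg]

lemma body_y_neg : (fun (acc : List (List Int)) (_ : Nat) => acc ++
      [[PySem.List.pyGetD (PySem.List.pyGetD acc (-1) []) 0 0,
        PySem.List.pyGetD (PySem.List.pyGetD acc (-1) []) 1 0 + 1000]])
    = (fun acc _ => acc ++
      [[PySem.List.pyGetD (PySem.List.pyGetD acc (-1) []) 0 0 + 0,
        PySem.List.pyGetD (PySem.List.pyGetD acc (-1) []) 1 0 + 1000]]) := by
  funext acc i; simp

-- ===== VERDICT (by name: the statement is the Claim_ definition above) =====
theorem relay_spec : Claim_equal_relay := by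
  intro position target _ _
  unfold Spec_relay
  simp only [relay, relay_alt]
  by_cases hx : PySem.List.pyGetD position 0 0 - PySem.List.pyGetD target 0 0 > 0 <;>
    by_cases hy : PySem.List.pyGetD position 1 0 - PySem.List.pyGetD target 1 0 > 0
  · simp only [if_pos hx, if_pos hy]; rw [body_x_pos, body_y_pos, core]
  · simp only [if_pos hx, if_neg hy]; rw [body_x_pos, body_y_neg, core]
  · simp only [if_neg hx, if_pos hy]; rw [body_x_neg, body_y_pos, core]
  · simp only [if_neg hx, if_neg hy]; rw [body_x_neg, body_y_neg, core]
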